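-- pv_equiv track=rewrite | github.com/chengcz/bixcode-snippets | vcf/EffSelector.py | __flag_coding_region
-- ===== SOURCE A (Python) =====
-- def __flag_coding_region(consequence):
--     """
--     reference
--     ---------
--         https://m.ensembl.org/info/genome/variation/prediction/predicted_data.html
--
--     Sequence Ontology term
--     ----------------------
--         chromosome_number_variation         HIGH          coding
--         exon_loss_variant                   HIGH          coding
--         frameshift_variant                  HIGH          coding
--         rare_amino_acid_variant             HIGH          coding
--         splice_acceptor_variant             HIGH          coding
--         splice_donor_variant                HIGH          coding
--         start_lost                          HIGH          coding
--         stop_gained                         HIGH          coding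
--         stop_lost                           HIGH          coding
--         transcript_ablation                 HIGH          coding
--         3_prime_UTR_truncation & exon_loss  MODERATE      coding
--         5_prime_UTR_truncation & exon_loss_variant  MODERATE  coding
--         coding_sequence_variant             MODERATE      coding
--         conservative_inframe_deletion       MODERATE      coding
--         conservative_inframe_insertion      MODERATE      coding
--         disruptive_inframe_deletion         MODERATE      coding
--         disruptive_inframe_insertion        MODERATE      coding
--         missense_variant                    MODERATE      coding
--         regulatory_region_ablation          MODERATE
--         splice_region_variant               MODERATE      coding
--         TFBS_ablation                       MODERATE
--         5_prime_UTR_premature_start_codon_gain_variant  LOW  coding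
--         initiator_codon_variant             LOW           coding
--         splice_region_variant               LOW           coding
--         start_retained                      LOW
--         stop_retained_variant               LOW
--         synonymous_variant                  LOW
--         3_prime_UTR_variant                 MODIFIER
--         5_prime_UTR_variant                 MODIFIER
--         coding_sequence_variant             MODIFIER
--         conserved_intergenic_variant        MODIFIER
--         conserved_intron_variant            MODIFIER
--         downstream_gene_variant             MODIFIER
--         exon_variant                        MODIFIER
--         feature_elongation                  MODIFIER
--         feature_truncation                  MODIFIER
--         gene_variant                        MODIFIER
--         intergenic_region                   MODIFIER
--         intragenic_variant                  MODIFIER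
--         intron_variant                      MODIFIER
--         mature_miRNA_variant                MODIFIER
--         miRNA                               MODIFIER
--         NMD_transcript_variant              MODIFIER
--         non_coding_transcript_exon_variant  MODIFIER
--         non_coding_transcript_variant       MODIFIER
--         regulatory_region_amplification     MODIFIER
--         regulatory_region_variant           MODIFIER
--         TF_binding_site_variant             MODIFIER
--         TFBS_amplification                  MODIFIER
--         transcript_amplification            MODIFIER
--         transcript_variant                  MODIFIER
--         upstream_gene_variant               MODIFIER
--     """
--     CodingRegion = {
--         "transcript_ablation", "splice_acceptor_variant", "splice_donor_variant",
--         "stop_gained", "frameshift_variant", "stop_lost", "start_lost",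
--         "inframe_insertion", "inframe_deletion", "missense_variant",
--         "protein_altering_variant", "splice_region_variant",
--         "incomplete_terminal_codon_variant", "start_retained_variant",
--         "stop_retained_variant", "coding_sequence_variant",
--         "NMD_transcript_variant", "synonymous_variant",
--         # "5_prime_UTR_variant", "3_prime_UTR_variant", "intron_variant"
--     }
--     GeneRegion = {
--         "5_prime_UTR_variant", "3_prime_UTR_variant", "intron_variant",
--         "non_coding_transcript_exon_variant", "mature_miRNA_variant"
--     }
--     consequence = set([m.strip() for m in consequence.split('&')])
--     if consequence & CodingRegion:
--         return ''
--     if consequence & GeneRegion: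
--         return 'GeneRegion'
--     return 'UpDownStream'
-- ===== SOURCE B (Python) =====
-- def __flag_coding_region(consequence):
--     CODING = {
--         "transcript_ablation", "splice_acceptor_variant", "splice_donor_variant",
--         "stop_gained", "frameshift_variant", "stop_lost", "start_lost",
--         "inframe_insertion", "inframe_deletion", "missense_variant",
--         "protein_altering_variant", "splice_region_variant",
--         "incomplete_terminal_codon_variant", "start_retained_variant",
--         "stop_retained_variant", "coding_sequence_variant",
--         "NMD_transcript_variant", "synonymous_variant",
--     }
--     GENE = {
--         "5_prime_UTR_variant", "3_prime_UTR_variant", "intron_variant",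
--         "non_coding_transcript_exon_variant", "mature_miRNA_variant",
--     }
--
--     def rank(tok):
--         t = tok.strip()
--         if t in CODING:
--             return 0
--         if t in GENE:
--             return 1
--         return 2
--
--     m = 2
--     for tok in consequence.split('&'):
--         m = min(m, rank(tok))
--     return ('', 'GeneRegion', 'UpDownStream')[m]
-- ===== Notes on version B (the rewrite author's own statement) =====
-- stated objective: alternative
-- what changed: Replaces A's build-a-set-then-two-set-intersection tests by a single pass that folds a minimum priority rank (0=coding, 1=gene region, 2=unknown) over the tokens and indexes the answer table by that rank.
import Mathlib
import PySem

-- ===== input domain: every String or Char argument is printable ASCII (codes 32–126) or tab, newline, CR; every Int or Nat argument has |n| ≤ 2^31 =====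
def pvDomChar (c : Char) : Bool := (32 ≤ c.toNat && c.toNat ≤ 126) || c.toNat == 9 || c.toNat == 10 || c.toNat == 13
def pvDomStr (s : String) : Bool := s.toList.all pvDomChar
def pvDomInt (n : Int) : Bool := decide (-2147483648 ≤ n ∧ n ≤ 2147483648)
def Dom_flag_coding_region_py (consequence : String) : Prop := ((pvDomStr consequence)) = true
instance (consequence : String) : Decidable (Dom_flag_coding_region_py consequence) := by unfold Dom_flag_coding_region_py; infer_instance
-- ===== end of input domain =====

-- B folds one minimum priority rank over the tokens instead of A's set-building plus two intersection tests; same cost, alternative decomposition.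

-- shared literal term tables (the same constants both Pythons carry)
def codingTerms : List String :=
  ["transcript_ablation", "splice_acceptor_variant", "splice_donor_variant",
   "stop_gained", "frameshift_variant", "stop_lost", "start_lost",
   "inframe_insertion", "inframe_deletion", "missense_variant",
   "protein_altering_variant", "splice_region_variant",
   "incomplete_terminal_codon_variant", "start_retained_variant",
   "stop_retained_variant", "coding_sequence_variant",
   "NMD_transcript_variant", "synonymous_variant"]

def geneTerms : List String :=
  ["5_prime_UTR_variant", "3_prime_UTR_variant", "intron_variant",
   "non_coding_transcript_exon_variant", "mature_miRNA_variant"]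

-- ===== PORT A =====
def flag_coding_region_py (consequence : String) : String :=
  let codingRegion : PySem.Set String := PySem.Set.ofList codingTerms
  let geneRegion : PySem.Set String := PySem.Set.ofList geneTerms
  let cset : PySem.Set String :=
    PySem.Set.ofList (((PySem.Str.split? consequence "&").getD []).map PySem.Str.strip)
  if PySem.Set.inter cset codingRegion ≠ [] then ""
  else if PySem.Set.inter cset geneRegion ≠ [] then "GeneRegion"
  else "UpDownStream"

-- ===== PORT B =====
def bRank (tok : String) : Nat :=
  let t := PySem.Str.strip tok
  if codingTerms.contains t then 0
  else if geneTerms.contains t then 1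
  else 2

def flag_coding_region_py_alt (consequence : String) : String :=
  let m := ((PySem.Str.split? consequence "&").getD []).foldl (fun m tok => min m (bRank tok)) 2
  match m with
  | 0 => ""
  | 1 => "GeneRegion"
  | _ => "UpDownStream"

-- ===== PRECONDITION & SPEC =====
def Spec_flag_coding_region_py (consequence : String) (out : String) : Prop := out = flag_coding_region_py_alt consequence
instance (consequence : String) (out : String) : Decidable (Spec_flag_coding_region_py consequence out) := by unfold Spec_flag_coding_region_py; infer_instance

-- ===== CLAIM (what is proved, stated in full; the proofs are below) =====
def Claim_equal_flag_coding_region_py : Prop := ∀ (consequence : String), Dom_flag_coding_region_py consequence → Spec_flag_coding_region_py consequence (flag_coding_region_py consequence)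

-- ===== LEMMAS AND PROOFS =====

lemma inter_ne_nil_iff (ts l : List String) :
    (PySem.Set.inter (PySem.Set.ofList ts) l ≠ []) ↔ ∃ t ∈ ts, t ∈ l := by
  rw [ne_eq, List.eq_nil_iff_forall_not_mem]
  push Not
  simp [PySem.Set.mem_inter, PySem.Set.mem_ofList]

lemma foldl_min_rank_zero (ts : List String) :
    ts.foldl (fun m tok => min m (bRank tok)) 0 = 0 := by
  induction ts with
  | nil => rfl
  | cons t ts ih => simp [List.foldl, ih]

lemma foldl_min_rank_one (ts : List String) :
    ts.foldl (fun m tok => min m (bRank tok)) 1 =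
      if ts.any (fun t => bRank t = 0) then 0 else 1 := by
  induction ts with
  | nil => rfl
  | cons t ts ih =>
    by_cases h : bRank t = 0
    · simp [List.foldl, h, foldl_min_rank_zero]
    · have h1 : min 1 (bRank t) = 1 := by omega
      simp [List.foldl, h1, ih, h]

lemma foldl_min_rank_two (ts : List String) :
    ts.foldl (fun m tok => min m (bRank tok)) 2 =
      if ts.any (fun t => bRank t = 0) then 0
      else if ts.any (fun t => bRank t = 1) then 1 else 2 := by
  induction ts with
  | nil => rfl
  | cons t ts ih =>
    have hle : bRank t ≤ 2 := by simp only [bRank]; split_ifs <;> omega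
    by_cases h0 : bRank t = 0
    · simp [List.foldl, h0, foldl_min_rank_zero]
    · by_cases h1 : bRank t = 1
      · have hm : min 2 (bRank t) = 1 := by omega
        rw [List.foldl_cons, hm, foldl_min_rank_one]
        by_cases ha : ts.any (fun t => bRank t = 0) <;> simp [ha, h1]
      · have h2 : min 2 (bRank t) = 2 := by omega
        simp [List.foldl, h2, ih, h0, h1]

lemma bRank_cases (t : String) :
    (bRank t = 0 ↔ PySem.Str.strip t ∈ codingTerms) ∧
    (bRank t = 1 ↔ PySem.Str.strip t ∉ codingTerms ∧ PySem.Str.strip t ∈ geneTerms) := by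
  simp only [bRank]
  split_ifs with h1 h2 <;>
    simp_all

-- ===== VERDICT (by name: the statement is the Claim_ definition above) =====
theorem flag_coding_region_py_spec : Claim_equal_flag_coding_region_py := by
  intro consequence _
  unfold Spec_flag_coding_region_py flag_coding_region_py flag_coding_region_py_alt
  set ts := (PySem.Str.split? consequence "&").getD [] with hts
  simp only [foldl_min_rank_two]
  have hcod : ((PySem.Set.ofList (ts.map PySem.Str.strip)).inter (PySem.Set.ofList codingTerms) ≠ [])
      ↔ ts.any (fun t => bRank t = 0) = true := by
    rw [inter_ne_nil_iff]
    simp only [List.any_eq_true, List.mem_map, decide_eq_true_eq, PySem.Set.mem_ofList]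
    constructor
    · rintro ⟨x, ⟨t, ht, rfl⟩, hx⟩
      exact ⟨t, ht, (bRank_cases t).1.mpr hx⟩
    · rintro ⟨t, ht, h0⟩
      exact ⟨PySem.Str.strip t, ⟨t, ht, rfl⟩, (bRank_cases t).1.mp h0⟩
  by_cases h0 : ts.any (fun t => bRank t = 0) = true
  · simp [hcod.mpr h0, h0]
  · have hno : ∀ t ∈ ts, PySem.Str.strip t ∉ codingTerms := by
      intro t ht hc
      exact h0 (List.any_eq_true.mpr ⟨t, ht, by simp [(bRank_cases t).1.mpr hc]⟩)
    have hcond : ¬ ((PySem.Set.ofList (ts.map PySem.Str.strip)).inter (PySem.Set.ofList codingTerms) ≠ []) := by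
      intro h; exact h0 (hcod.mp h)
    have hgene : ((PySem.Set.ofList (ts.map PySem.Str.strip)).inter (PySem.Set.ofList geneTerms) ≠ [])
        ↔ ts.any (fun t => bRank t = 1) = true := by
      rw [inter_ne_nil_iff]
      simp only [List.any_eq_true, List.mem_map, decide_eq_true_eq, PySem.Set.mem_ofList]
      constructor
      · rintro ⟨x, ⟨t, ht, rfl⟩, hx⟩
        exact ⟨t, ht, (bRank_cases t).2.mpr ⟨hno t ht, hx⟩⟩
      · rintro ⟨t, ht, h1⟩
        exact ⟨PySem.Str.strip t, ⟨t, ht, rfl⟩, ((bRank_cases t).2.mp h1).2⟩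
    by_cases h1 : ts.any (fun t => bRank t = 1) = true
    · simp [hcond, hgene.mpr h1, h0, h1]
    · have : ¬ ((PySem.Set.ofList (ts.map PySem.Str.strip)).inter (PySem.Set.ofList geneTerms) ≠ []) := by
        intro h; exact h1 (hgene.mp h)
      simp [hcond, this, h0, h1]
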